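-- pv_equiv track=rewrite | github.com/Mineric/Data-Structure-and-Algorithms-Practice | diagonal_difference.py | repeated_el
-- ===== SOURCE A (Python) =====
-- def repeated_el(arr):
--     result = []
--     repeated_num = []
--     required_num = []
--
--     for arrays in arr:
--         for elements in arrays:
--             result.append(elements)
--
--     for i in result:
--         if result.count(i) > 1:
--             repeated_num.append(i)
--
--     for i in list(dict.fromkeys(repeated_num)):
--         repeated_num.remove(i)
--
--     for i in range(1,10):
--         if i not in result:
--             required_num.append(i)
--
--
--     [exc_num, req_num] = [sorted(repeated_num), required_num]
--
--     return [exc_num, req_num]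
-- ===== SOURCE B (Python) =====
-- def repeated_el(arr):
--     flat = [x for row in arr for x in row]
--     seen = set()
--     repeated = []
--     for x in flat:
--         if x in seen:
--             repeated.append(x)
--         else:
--             seen.add(x)
--     required = [i for i in range(1, 10) if i not in flat]
--     return [sorted(repeated), required]
-- ===== Notes on version B (the rewrite author's own statement) =====
-- stated objective: faster
-- what changed: Replaces A's quadratic count()-filter over the whole flattened list plus the dedup-and-remove pass with a single incremental pass keeping a 'seen' set that appends each element after its first occurrence, then sorts once.
import Mathlib
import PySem

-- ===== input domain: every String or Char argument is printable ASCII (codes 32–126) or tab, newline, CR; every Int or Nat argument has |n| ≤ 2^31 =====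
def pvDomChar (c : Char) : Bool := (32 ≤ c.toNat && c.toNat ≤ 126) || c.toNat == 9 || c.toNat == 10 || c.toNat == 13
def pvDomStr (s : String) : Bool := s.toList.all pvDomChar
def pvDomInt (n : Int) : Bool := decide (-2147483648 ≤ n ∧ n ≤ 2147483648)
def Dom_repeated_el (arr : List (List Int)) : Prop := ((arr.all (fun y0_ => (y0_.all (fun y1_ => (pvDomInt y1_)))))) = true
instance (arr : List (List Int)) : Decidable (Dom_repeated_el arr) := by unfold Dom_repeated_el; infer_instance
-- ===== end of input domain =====

-- B replaces A's whole-list count() filter plus dedup-and-remove pass by one incremental pass with a 'seen' set (simpler).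

-- ===== PORT A =====
def repeated_el (arr : List (List Int)) : List (List Int) :=
  let result := arr.foldl (fun acc arrays => arrays.foldl (fun acc2 e => acc2 ++ [e]) acc) []
  let repeated_num := result.foldl (fun acc i => if PySem.List.count result i > 1 then acc ++ [i] else acc) []
  -- repeated_num.remove(i) never raises here (every i of the dedup is in the list); .getD is the total form
  let repeated_num2 := (PySem.List.dedup repeated_num).foldl (fun acc i => (PySem.List.remove? acc i).getD acc) repeated_num
  let required_num := (PySem.List.pyRange 1 10 1).foldl (fun acc i => if i ∉ result then acc ++ [i] else acc) []
  [PySem.List.sorted repeated_num2 (fun x => x) false, required_num]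

-- ===== PORT B =====
def repeated_el_alt (arr : List (List Int)) : List (List Int) :=
  let flat := arr.flatMap (fun row => row)
  let st := flat.foldl
    (fun (st : PySem.Set Int × List Int) x =>
      if PySem.Set.contains st.1 x then (st.1, st.2 ++ [x]) else (PySem.Set.add st.1 x, st.2))
    (PySem.Set.empty, [])
  let required := (PySem.List.pyRange 1 10 1).filter (fun i => !(flat.contains i))
  [PySem.List.sorted st.2 (fun x => x) false, required]

-- ===== PRECONDITION & SPEC =====
def Spec_repeated_el (arr : List (List Int)) (out : List (List Int)) : Prop := out = repeated_el_alt arr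
instance (arr : List (List Int)) (out : List (List Int)) : Decidable (Spec_repeated_el arr out) := by unfold Spec_repeated_el; infer_instance

-- ===== CLAIM (what is proved, stated in full; the proofs are below) =====
def Claim_equal_repeated_el : Prop := ∀ (arr : List (List Int)), Dom_repeated_el arr → Spec_repeated_el arr (repeated_el arr)

-- ===== LEMMAS AND PROOFS =====

-- the remove loop: removing one copy of each member of a nodup sublist subtracts 1 from each count
lemma removeFold_count (d : List Int) (xs : List Int) (hnd : d.Nodup) (hsub : ∀ y ∈ d, y ∈ xs) (v : Int) :
    (d.foldl (fun acc i => (PySem.List.remove? acc i).getD acc) xs).count v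
      = xs.count v - (if v ∈ d then 1 else 0) := by
  induction d generalizing xs with
  | nil => simp
  | cons a t ih =>
    have ha : a ∈ xs := hsub a List.mem_cons_self
    have hnd' := (List.nodup_cons.mp hnd)
    have hsub' : ∀ y ∈ t, y ∈ xs.erase a := by
      intro y hy
      exact (List.mem_erase_of_ne (by rintro rfl; exact hnd'.1 hy)).mpr (hsub y (List.mem_cons_of_mem _ hy))
    simp only [List.foldl_cons, PySem.List.remove?_eq_some_erase xs a ha, Option.getD_some]
    rw [ih (xs.erase a) hnd'.2 hsub' ]
    rw [List.count_erase]
    by_cases hva : v = a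
    · subst hva
      have : v ∉ t := hnd'.1
      simp [this]
    · have h0 : (if (a == v) = true then 1 else 0) = 0 := by simp [Ne.symm hva]
      rw [h0]
      simp [List.mem_cons, hva]

-- B's incremental pass: count of the accumulated repeated list
lemma seenFold_count (xs : List Int) (s : PySem.Set Int) (r : List Int) (v : Int) :
    ((xs.foldl
      (fun (st : PySem.Set Int × List Int) x =>
        if PySem.Set.contains st.1 x then (st.1, st.2 ++ [x]) else (PySem.Set.add st.1 x, st.2))
      (s, r)).2).count v
      = r.count v + (if v ∈ s then xs.count v else xs.count v - (if v ∈ xs then 1 else 0)) := by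
  induction xs generalizing s r with
  | nil => simp
  | cons a t ih =>
    simp only [List.foldl_cons]
    by_cases hmem : a ∈ s
    · have hc : PySem.Set.contains s a = true := by
        simpa [PySem.Set.contains] using hmem
      rw [if_pos hc, ih]
      by_cases hva : v = a
      · subst hva
        rw [if_pos hmem, if_pos hmem, List.count_append]
        simp
        omega
      · have h1 : List.count v [a] = 0 := List.count_eq_zero.mpr (by simp [hva])
        have h2 : List.count v (a :: t) = List.count v t := List.count_cons_of_ne (Ne.symm hva)
        have h3 : (v ∈ a :: t) ↔ v ∈ t := by simp [List.mem_cons, hva]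
        by_cases hvs : v ∈ s <;> simp [hvs, List.count_append, h1, h2, h3]
    · have hc : ¬ PySem.Set.contains s a = true := by
        simpa [PySem.Set.contains] using hmem
      rw [if_neg hc, ih]
      by_cases hva : v = a
      · subst hva
        simp [hmem, List.count_cons_self]
      · have hvadd : (v ∈ s.add a) ↔ v ∈ s := by
          rw [PySem.Set.mem_add]; simp [hva]
        have h2 : List.count v (a :: t) = List.count v t := List.count_cons_of_ne (Ne.symm hva)
        have h3 : (v ∈ a :: t) ↔ v ∈ t := by simp [List.mem_cons, hva]
        simp only [hvadd, h2, h3]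

lemma required_eq (flat : List Int) :
    (PySem.List.pyRange 1 10 1).foldl (fun acc i => if i ∉ flat then acc ++ [i] else acc) []
      = (PySem.List.pyRange 1 10 1).filter (fun i => !(flat.contains i)) := by
  rw [PySem.List.foldl_append_ite_eq_filter (fun i => i ∉ flat)]
  simp

-- ===== VERDICT (by name: the statement is the Claim_ definition above) =====
theorem repeated_el_spec : Claim_equal_repeated_el := by
  intro arr _
  show repeated_el arr = repeated_el_alt arr
  unfold repeated_el repeated_el_alt
  simp only [PySem.List.foldl_append_singleton_eq_self, PySem.List.foldl_append_eq_flatten,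
    List.nil_append]
  have hflat : arr.flatMap (fun row => row) = arr.flatten := by simp
  rw [hflat, required_eq]
  congr 1
  -- remaining: the two sorted lists are equal
  set res := arr.flatten with hres
  rw [PySem.List.foldl_append_ite_eq_filter (fun i => PySem.List.count res i > 1), List.nil_append]
  set rep1 := res.filter (fun i => decide (PySem.List.count res i > 1)) with hrep1
  rw [PySem.List.sorted_id_eq_sorted_id_iff_perm]
  rw [List.perm_iff_count]
  intro v
  rw [removeFold_count _ _ (PySem.List.nodup_dedup rep1)
        (fun y hy => (PySem.List.mem_dedup rep1 y).mp hy),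
      seenFold_count]
  have hempty : v ∉ (PySem.Set.empty : PySem.Set Int) := by simp [PySem.Set.empty]
  rw [if_neg hempty]
  simp only [List.count_nil, Nat.zero_add]
  simp only [PySem.List.mem_dedup]
  by_cases hc : 1 < List.count v res
  · have hp : (fun i => decide (PySem.List.count res i > 1)) v = true := by
      simp [PySem.List.count_eq, hc]
    have hcv : List.count v rep1 = List.count v res := by
      rw [hrep1]; exact List.count_filter hp
    have hvm : v ∈ rep1 := by
      rw [hrep1, List.mem_filter]
      exact ⟨List.count_pos_iff.mp (by omega), hp⟩
    have hvres : v ∈ res := List.count_pos_iff.mp (by omega)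
    rw [hcv, if_pos hvm, if_pos hvres]
  · have hvm : v ∉ rep1 := by
      rw [hrep1, List.mem_filter]
      rintro ⟨-, hp⟩
      simp [PySem.List.count_eq] at hp
      omega
    have hcv : List.count v rep1 = 0 := List.count_eq_zero.mpr hvm
    rw [hcv, if_neg hvm]
    by_cases hvres : v ∈ res
    · have : List.count v res = 1 := by
        have := List.count_pos_iff.mpr hvres
        omega
      rw [if_pos hvres, this]
    · rw [if_neg hvres, List.count_eq_zero.mpr hvres]
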